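-- pv_equiv track=rewrite | github.com/itbaans/pdc_proj | StaticSplit_GPUx3.py | split_configurations_static
-- ===== SOURCE A (Python) =====
-- def split_configurations_static(configs_with_indices, num_cpu_workers, num_gpu_workers, gpu_multiplier): # Unchanged from your logged A1
--     total_configs = len(configs_with_indices)
--     if total_configs == 0: return [], []
--     gpu_batch = []; cpu_batches = [[] for _ in range(num_cpu_workers if num_cpu_workers > 0 else 1)] # Ensure cpu_batches is list even if num_cpu_workers is 0
--
--     # If no CPU workers but GPU worker exists, all go to GPU
--     if num_cpu_workers == 0 and num_gpu_workers > 0: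
--         gpu_batch = configs_with_indices
--         return gpu_batch, []
--     # If no GPU workers but CPU workers exist, all go to CPUs
--     if num_gpu_workers == 0 and num_cpu_workers > 0:
--         for i, cfg_item in enumerate(configs_with_indices):
--             cpu_batches[i % num_cpu_workers].append(cfg_item)
--         return [], [b for b in cpu_batches if b]
--     # If both exist
--     if num_gpu_workers > 0 and num_cpu_workers > 0:
--         total_units = (gpu_multiplier * num_gpu_workers) + num_cpu_workers
--         unit_batch_size = max(1, total_configs // total_units if total_units > 0 else total_configs)
--         gpu_batch_target_size = unit_batch_size * gpu_multiplier * num_gpu_workers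
--         gpu_batch = configs_with_indices[:gpu_batch_target_size]
--         remaining_configs = configs_with_indices[gpu_batch_target_size:]
--         for i, cfg_item in enumerate(remaining_configs):
--             cpu_batches[i % num_cpu_workers].append(cfg_item)
--         return gpu_batch, [b for b in cpu_batches if b]
--     # If no workers at all (should not happen if main logic prevents it)
--     if num_gpu_workers == 0 and num_cpu_workers == 0:
--         return [], []
--
--     return gpu_batch, [b for b in cpu_batches if b]
-- ===== SOURCE B (Python) =====
-- def split_configurations_static(configs_with_indices, num_cpu_workers, num_gpu_workers, gpu_multiplier):
--     if len(configs_with_indices) == 0: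
--         return [], []
--     if num_cpu_workers == 0 and num_gpu_workers > 0:
--         return configs_with_indices, []
--     if num_gpu_workers == 0 and num_cpu_workers > 0:
--         gpu_batch, remaining = [], configs_with_indices
--     elif num_gpu_workers > 0 and num_cpu_workers > 0:
--         total_units = gpu_multiplier * num_gpu_workers + num_cpu_workers
--         unit = max(1, len(configs_with_indices) // total_units if total_units > 0 else len(configs_with_indices))
--         target = unit * gpu_multiplier * num_gpu_workers
--         gpu_batch, remaining = configs_with_indices[:target], configs_with_indices[target:]
--     else:
--         return [], []
--     cpu_batches = [remaining[j::num_cpu_workers] for j in range(num_cpu_workers)]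
--     return gpu_batch, [b for b in cpu_batches if b]
-- ===== Notes on version B (the rewrite author's own statement) =====
-- stated objective: idiomatic
-- what changed: The per-item round-robin dispatch loops (enumerate + append into batch i % n) are replaced by a per-worker stride-slice construction (remaining[j::num_cpu_workers] for each worker j), and the branch bodies share one common tail instead of three separate return paths.
import Mathlib
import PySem

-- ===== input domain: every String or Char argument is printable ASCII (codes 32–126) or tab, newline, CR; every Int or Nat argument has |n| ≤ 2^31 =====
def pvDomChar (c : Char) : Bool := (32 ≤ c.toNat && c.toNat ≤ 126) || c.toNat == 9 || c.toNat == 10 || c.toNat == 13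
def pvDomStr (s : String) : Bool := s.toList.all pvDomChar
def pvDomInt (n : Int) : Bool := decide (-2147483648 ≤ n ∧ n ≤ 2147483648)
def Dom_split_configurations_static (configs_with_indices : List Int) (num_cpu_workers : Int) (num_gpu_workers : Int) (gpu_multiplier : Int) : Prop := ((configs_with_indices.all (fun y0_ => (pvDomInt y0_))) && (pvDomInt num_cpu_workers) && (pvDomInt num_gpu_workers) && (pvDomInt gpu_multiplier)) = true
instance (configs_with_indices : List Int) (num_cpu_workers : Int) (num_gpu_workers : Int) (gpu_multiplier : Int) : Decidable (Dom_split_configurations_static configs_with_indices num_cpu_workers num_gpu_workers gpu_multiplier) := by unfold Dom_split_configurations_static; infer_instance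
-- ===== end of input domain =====

-- B replaces A's per-item round-robin dispatch loops by per-worker stride slices
-- (remaining[j::n]) with one shared tail; same values, objective: more idiomatic.

-- ===== PORT A =====
-- round-robin loop: `for i, cfg_item in enumerate(xs): batches[i % n].append(cfg_item)`
-- (k is the running enumerate index, a nonnegative int, so Nat `%` agrees with Python's)
def pvRR (n : Nat) : Nat → List Int → List (List Int) → List (List Int)
  | _, [], b => b
  | k, x :: xs, b => pvRR n (k + 1) xs (b.set (k % n) (b[k % n]! ++ [x]))

def split_configurations_static (configs_with_indices : List Int) (num_cpu_workers : Int) (num_gpu_workers : Int) (gpu_multiplier : Int) : List Int × List (List Int) :=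
  let total_configs : Int := configs_with_indices.length
  if total_configs = 0 then ([], [])
  else
    let gpu_batch : List Int := []
    let cpu_batches : List (List Int) :=
      List.replicate (if num_cpu_workers > 0 then num_cpu_workers.toNat else 1) []
    if num_cpu_workers = 0 ∧ num_gpu_workers > 0 then (configs_with_indices, [])
    else if num_gpu_workers = 0 ∧ num_cpu_workers > 0 then
      ([], (pvRR num_cpu_workers.toNat 0 configs_with_indices cpu_batches).filter (fun b => !b.isEmpty))
    else if num_gpu_workers > 0 ∧ num_cpu_workers > 0 then
      let total_units := gpu_multiplier * num_gpu_workers + num_cpu_workers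
      let unit_batch_size := max 1 (if total_units > 0 then PySem.Int.floordiv total_configs total_units else total_configs)
      let gpu_batch_target_size := unit_batch_size * gpu_multiplier * num_gpu_workers
      let gpu_batch := PySem.List.slice configs_with_indices none (some gpu_batch_target_size)
      let remaining := PySem.List.slice configs_with_indices (some gpu_batch_target_size) none
      (gpu_batch, (pvRR num_cpu_workers.toNat 0 remaining cpu_batches).filter (fun b => !b.isEmpty))
    else if num_gpu_workers = 0 ∧ num_cpu_workers = 0 then ([], [])
    else (gpu_batch, cpu_batches.filter (fun b => !b.isEmpty))

-- ===== PORT B =====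
-- hand port of the extended slice xs[j::n]; exact for the uses in Source B (0 ≤ j, step n ≥ 1)
def pvStrideAux (n : Nat) : List Int → List Int
  | [] => []
  | x :: xs => x :: pvStrideAux n (xs.drop (n - 1))
termination_by l => l.length
decreasing_by simp

def pvStride (xs : List Int) (j n : Nat) : List Int := pvStrideAux n (xs.drop j)

def split_configurations_static_alt (configs_with_indices : List Int) (num_cpu_workers : Int) (num_gpu_workers : Int) (gpu_multiplier : Int) : List Int × List (List Int) :=
  if (configs_with_indices.length : Int) = 0 then ([], [])
  else if num_cpu_workers = 0 ∧ num_gpu_workers > 0 then (configs_with_indices, [])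
  else
    -- shared tail: `cpu_batches = [remaining[j::num_cpu_workers] for j in range(num_cpu_workers)]`
    let finish : List Int × List Int → List Int × List (List Int) := fun gr =>
      (gr.1, ((List.range num_cpu_workers.toNat).map
                (fun j => pvStride gr.2 j num_cpu_workers.toNat)).filter (fun b => !b.isEmpty))
    if num_gpu_workers = 0 ∧ num_cpu_workers > 0 then finish ([], configs_with_indices)
    else if num_gpu_workers > 0 ∧ num_cpu_workers > 0 then
      let total_units := gpu_multiplier * num_gpu_workers + num_cpu_workers
      let unit := max 1 (if total_units > 0 then PySem.Int.floordiv (configs_with_indices.length : Int) total_units else (configs_with_indices.length : Int))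
      let target := unit * gpu_multiplier * num_gpu_workers
      finish (PySem.List.slice configs_with_indices none (some target),
              PySem.List.slice configs_with_indices (some target) none)
    else ([], [])

-- ===== PRECONDITION & SPEC =====
def Spec_split_configurations_static (configs_with_indices : List Int) (num_cpu_workers : Int) (num_gpu_workers : Int) (gpu_multiplier : Int) (out : List Int × List (List Int)) : Prop := out = split_configurations_static_alt configs_with_indices num_cpu_workers num_gpu_workers gpu_multiplier
instance (configs_with_indices : List Int) (num_cpu_workers : Int) (num_gpu_workers : Int) (gpu_multiplier : Int) (out : List Int × List (List Int)) : Decidable (Spec_split_configurations_static configs_with_indices num_cpu_workers num_gpu_workers gpu_multiplier out) := by unfold Spec_split_configurations_static; infer_instance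

-- ===== CLAIM (what is proved, stated in full; the proofs are below) =====
def Claim_equal_split_configurations_static : Prop := ∀ (configs_with_indices : List Int) (num_cpu_workers : Int) (num_gpu_workers : Int) (gpu_multiplier : Int), Dom_split_configurations_static configs_with_indices num_cpu_workers num_gpu_workers gpu_multiplier → Spec_split_configurations_static configs_with_indices num_cpu_workers num_gpu_workers gpu_multiplier (split_configurations_static configs_with_indices num_cpu_workers num_gpu_workers gpu_multiplier)

-- ===== LEMMAS AND PROOFS =====

-- spec of A's loop: pvPick n j xs = the elements of xs that land in the batch that is j steps ahead
def pvPick (n : Nat) : Nat → List Int → List Int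
  | _, [] => []
  | j, x :: xs => if j = 0 then x :: pvPick n (n - 1) xs else pvPick n (j - 1) xs

-- phase of batch j when the running index is k: distance (mod n) from k % n up to j
def pvPhase (n k j : Nat) : Nat := if k % n ≤ j then j - k % n else j + n - k % n

lemma pv_succ_mod (n k : Nat) (hn : 0 < n) :
    (k + 1) % n = if k % n = n - 1 then 0 else k % n + 1 := by
  rw [Nat.add_mod]
  rcases Nat.lt_or_ge 1 n with h | h
  · rw [Nat.mod_eq_of_lt h]
    have hlt : k % n < n := Nat.mod_lt _ hn
    by_cases he : k % n = n - 1
    · rw [he, Nat.sub_add_cancel (by omega : 1 ≤ n)]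
      simp
    · rw [Nat.mod_eq_of_lt (by omega)]
      simp [he]
  · have hn1 : n = 1 := by omega
    subst hn1; simp [Nat.mod_one]

lemma pvRR_length (n : Nat) (xs : List Int) : ∀ (k : Nat) (b : List (List Int)),
    (pvRR n k xs b).length = b.length := by
  induction xs with
  | nil => intro k b; simp [pvRR]
  | cons x xs ih => intro k b; simp [pvRR, ih]

lemma pvRR_get? (n : Nat) (hn : 0 < n) (xs : List Int) : ∀ (k : Nat) (b : List (List Int)),
    b.length = n → ∀ j, j < n →
    (pvRR n k xs b)[j]? = (b[j]?.map (· ++ pvPick n (pvPhase n k j) xs)) := by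
  induction xs with
  | nil => intro k b hb j hj; simp [pvRR, pvPick]
  | cons x xs ih =>
    intro k b hb j hj
    have hkn : k % n < n := Nat.mod_lt _ hn
    have hs := pv_succ_mod n k hn
    rw [pvRR, ih (k + 1) _ (by simp [hb]) j hj]
    by_cases hjk : j = k % n
    · have hp0 : pvPhase n k j = 0 := by unfold pvPhase; split_ifs <;> omega
      have hp1 : pvPhase n (k + 1) j = n - 1 := by
        unfold pvPhase; split_ifs at hs ⊢ <;> omega
      rw [hp0, hp1, hjk, List.getElem?_set_self (by omega),
        List.getElem?_eq_getElem (show k % n < b.length by omega),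
        getElem!_pos b (k % n) (by omega)]
      simp [pvPick, List.append_assoc]
    · have hpne : pvPhase n k j ≠ 0 := by unfold pvPhase; split_ifs <;> omega
      have hstep : pvPhase n (k + 1) j = pvPhase n k j - 1 := by
        unfold pvPhase; split_ifs at hs ⊢ <;> omega
      rw [hstep, List.getElem?_set_ne (Ne.symm hjk)]
      rw [show pvPick n (pvPhase n k j) (x :: xs) = pvPick n (pvPhase n k j - 1) xs from by
        rw [pvPick]; simp [hpne]]

lemma pvPick_eq_stride (n : Nat) (hn : 0 < n) (xs : List Int) : ∀ j, j < n →
    pvPick n j xs = pvStrideAux n (xs.drop j) := by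
  induction xs with
  | nil =>
    intro j hj
    rw [List.drop_nil, pvStrideAux.eq_def]
    simp [pvPick]
  | cons x xs ih =>
    intro j hj
    cases j with
    | zero =>
      rw [List.drop_zero, pvStrideAux.eq_def]
      simp [pvPick, ih (n - 1) (by omega)]
    | succ m =>
      rw [List.drop_succ_cons, ← ih m (by omega)]
      simp [pvPick]

lemma pvRR_eq_strides (n : Nat) (hn : 0 < n) (xs : List Int) :
    pvRR n 0 xs (List.replicate n []) = (List.range n).map (fun j => pvStride xs j n) := by
  apply List.ext_getElem?
  intro j
  by_cases hj : j < n
  · rw [pvRR_get? n hn xs 0 _ (by simp) j hj]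
    have hph : pvPhase n 0 j = j := by unfold pvPhase; simp [Nat.zero_mod]
    rw [hph]
    simp [hj, pvStride, pvPick_eq_stride n hn xs j hj]
  · rw [List.getElem?_eq_none (show (pvRR n 0 xs (List.replicate n [])).length ≤ j by
        rw [pvRR_length]; simp; omega),
      List.getElem?_eq_none (by simp; omega)]

-- ===== VERDICT (by name: the statement is the Claim_ definition above) =====
theorem split_configurations_static_spec : Claim_equal_split_configurations_static := by
  intro cfgs ncpu ngpu gmul _
  unfold Spec_split_configurations_static split_configurations_static split_configurations_static_alt
  by_cases h0 : (cfgs.length : Int) = 0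
  · simp [h0]
  · simp only [h0, if_false]
    by_cases h1 : ncpu = 0 ∧ ngpu > 0
    · simp [h1]
    · simp only [h1, if_false]
      by_cases h2 : ngpu = 0 ∧ ncpu > 0
      · have hpos : 0 < ncpu.toNat := by omega
        simp [h2, pvRR_eq_strides ncpu.toNat hpos]
      · simp only [h2, if_false]
        by_cases h3 : ngpu > 0 ∧ ncpu > 0
        · have hpos : 0 < ncpu.toNat := by omega
          simp [h3, pvRR_eq_strides ncpu.toNat hpos]
        · simp only [h3, if_false]
          by_cases h4 : ngpu = 0 ∧ ncpu = 0
          · simp [h4]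
          · simp [h4]
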